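-- pv_equiv track=rewrite | github.com/NTC223/DataWarehouse | be/app/services/olap_router.py | map_columns_to_dimensions
-- ===== SOURCE A (Python) =====
-- from typing import List, Dict, Set, Tuple, Optional, Any, FrozenSet
--
-- INVENTORY_DIMENSION_COLUMNS = {
--     "time": ["year", "quarter", "month"],
--     "product": ["product_key"],
--     "store": ["store_key", "state", "city"],
-- }
--
-- def map_columns_to_dimensions(columns: List[str]) -> Set[str]:
--     """Ánh xạ cột -> dimension cho Inventory (state/city thuộc store)."""
--     dimensions = set()
--     for col in columns:
--         for dim, dim_cols in INVENTORY_DIMENSION_COLUMNS.items():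
--             if col in dim_cols:
--                 dimensions.add(dim)
--                 break
--     return dimensions
-- ===== SOURCE B (Python) =====
-- INVENTORY_DIMENSION_COLUMNS = {
--     "time": ["year", "quarter", "month"],
--     "product": ["product_key"],
--     "store": ["store_key", "state", "city"],
-- }
--
-- _COLUMN_TO_DIMENSION = {
--     col: dim
--     for dim, dim_cols in INVENTORY_DIMENSION_COLUMNS.items()
--     for col in dim_cols
-- }
--
-- def map_columns_to_dimensions(columns):
--     """Ánh xạ cột -> dimension cho Inventory (state/city thuộc store)."""
--     dimensions = set()
--     for col in columns:
--         dim = _COLUMN_TO_DIMENSION.get(col)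
--         if dim is not None:
--             dimensions.add(dim)
--     return dimensions
-- ===== Notes on version B (the rewrite author's own statement) =====
-- stated objective: faster
-- what changed: B precomputes a flat reverse map column->dimension once and does a single pass with one O(1) lookup per column, replacing A's per-column nested scan over all dimensions with an early break.
import Mathlib
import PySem

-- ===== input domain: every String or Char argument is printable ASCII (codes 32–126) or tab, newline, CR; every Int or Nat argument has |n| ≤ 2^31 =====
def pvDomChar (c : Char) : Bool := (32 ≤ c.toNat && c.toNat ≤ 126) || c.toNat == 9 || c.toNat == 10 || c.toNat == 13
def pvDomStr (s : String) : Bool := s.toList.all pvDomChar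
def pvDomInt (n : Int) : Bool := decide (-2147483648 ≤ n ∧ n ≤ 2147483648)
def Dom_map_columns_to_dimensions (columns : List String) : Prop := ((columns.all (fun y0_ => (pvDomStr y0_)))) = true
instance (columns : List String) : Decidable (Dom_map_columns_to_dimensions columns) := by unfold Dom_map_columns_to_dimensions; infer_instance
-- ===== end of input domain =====

-- B replaces A's per-column scan over all dimensions by a precomputed reverse map column->dimension
-- and a single pass with one lookup per column (objective: simpler).

-- ===== PORT A =====
-- INVENTORY_DIMENSION_COLUMNS as a dict (insertion-order items)
def pvInventoryDimensionColumns : List (String × List String) :=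
  [("time", ["year", "quarter", "month"]),
   ("product", ["product_key"]),
   ("store", ["store_key", "state", "city"])]

-- A's inner 'for dim, dim_cols in …: if col in dim_cols: … break' — first matching dim
def pvFirstDim : List (String × List String) → String → Option String
  | [], _ => none
  | (dim, dimCols) :: rest, col =>
      if dimCols.contains col then some dim else pvFirstDim rest col

def map_columns_to_dimensions (columns : List String) : List String :=
  columns.foldl (fun dims col =>
    match pvFirstDim pvInventoryDimensionColumns col with
    | some dim => PySem.Set.add dims dim
    | none => dims) PySem.Set.empty

-- ===== PORT B =====
-- the dict comprehension flattening INVENTORY_DIMENSION_COLUMNS into column -> dimension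
def pvColumnToDimension : PySem.Dict String String :=
  pvInventoryDimensionColumns.foldl
    (fun d p => p.2.foldl (fun d c => d.insert c p.1) d) PySem.Dict.empty

def map_columns_to_dimensions_alt (columns : List String) : List String :=
  columns.foldl (fun dims col =>
    match pvColumnToDimension.get? col with
    | some dim => PySem.Set.add dims dim
    | none => dims) PySem.Set.empty

-- ===== PRECONDITION & SPEC =====
def Spec_map_columns_to_dimensions (columns : List String) (out : List String) : Prop := out = map_columns_to_dimensions_alt columns
instance (columns : List String) (out : List String) : Decidable (Spec_map_columns_to_dimensions columns out) := by unfold Spec_map_columns_to_dimensions; infer_instance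

-- ===== CLAIM (what is proved, stated in full; the proofs are below) =====
def Claim_equal_map_columns_to_dimensions : Prop := ∀ (columns : List String), Dom_map_columns_to_dimensions columns → Spec_map_columns_to_dimensions columns (map_columns_to_dimensions columns)

-- ===== LEMMAS AND PROOFS =====

-- pointwise agreement of the two per-column lookups
theorem pvLookup_agree (col : String) :
    pvColumnToDimension.get? col = pvFirstDim pvInventoryDimensionColumns col := by
  by_cases h1 : col = "year"
  · subst h1; decide
  by_cases h2 : col = "quarter"
  · subst h2; decide
  by_cases h3 : col = "month"
  · subst h3; decide
  by_cases h4 : col = "product_key"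
  · subst h4; decide
  by_cases h5 : col = "store_key"
  · subst h5; decide
  by_cases h6 : col = "state"
  · subst h6; decide
  by_cases h7 : col = "city"
  · subst h7; decide
  · simp [pvColumnToDimension, pvInventoryDimensionColumns, pvFirstDim,
      PySem.Dict.get?_insert, PySem.Dict.get?_empty, List.foldl,
      h1, h2, h3, h4, h5, h6, h7]

-- ===== VERDICT (by name: the statement is the Claim_ definition above) =====
theorem map_columns_to_dimensions_spec : Claim_equal_map_columns_to_dimensions := by
  intro columns _
  show map_columns_to_dimensions columns = map_columns_to_dimensions_alt columns
  unfold map_columns_to_dimensions map_columns_to_dimensions_alt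
  congr 1
  funext dims col
  rw [pvLookup_agree]
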